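-- pv_equiv track=rewrite | github.com/ofirshtrosberg/pythonEx1 | parser.py | negNumbersReplaceMinusChar
-- ===== SOURCE A (Python) =====
-- def negNumbersReplaceMinusChar(expression):
--     mightBeNegNumber = False
--     expressionCopy = expression
--     index = -1
--     for i in range(0, len(expression)):
--         if expression[i] == '(':
--             mightBeNegNumber = True
--             index = i
--             continue
--         elif mightBeNegNumber == True and expression[i] == '-' and index+1 == i:
--             expressionCopy = expressionCopy[:i] + "&" + expressionCopy[i+1:]
--             mightBeNegNumber == False
--         else:
--             mightBeNegNumber == False
--     return expressionCopy
-- ===== SOURCE B (Python) =====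
-- def negNumbersReplaceMinusChar(expression):
--     out = []
--     prev = None
--     for ch in expression:
--         if ch == '-' and prev == '(':
--             out.append('&')
--         else:
--             out.append(ch)
--         prev = ch
--     return ''.join(out)
-- ===== Notes on version B (the rewrite author's own statement) =====
-- stated objective: simpler
-- what changed: A rescans by integer index, keeping a flag and the index of the last opening parenthesis, and splices the replacement character into a fresh copy of the string via slice concatenation; B is a single pass over the characters with a previous-character lookback that appends the (possibly replaced) character to an output list and joins it.
import Mathlib
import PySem

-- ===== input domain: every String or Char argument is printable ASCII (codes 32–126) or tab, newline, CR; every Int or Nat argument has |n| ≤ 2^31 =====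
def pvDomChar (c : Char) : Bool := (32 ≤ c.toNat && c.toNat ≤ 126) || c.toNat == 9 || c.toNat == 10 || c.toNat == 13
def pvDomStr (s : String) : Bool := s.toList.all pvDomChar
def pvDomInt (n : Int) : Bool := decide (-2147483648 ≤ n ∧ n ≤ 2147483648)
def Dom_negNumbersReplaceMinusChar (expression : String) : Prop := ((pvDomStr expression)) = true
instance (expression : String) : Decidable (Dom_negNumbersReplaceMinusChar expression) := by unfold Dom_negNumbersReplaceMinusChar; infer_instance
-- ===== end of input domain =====

-- B replaces A's index scan with flag/last-index state and string splicing by a single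
-- previous-character-lookback pass that appends to an output list (simpler, no splicing).


-- ===== PORT A =====
-- one iteration of A's "for i in range(0, len(expression))" body; state = (mightBeNegNumber, expressionCopy, index)
def aStep (s : List Char) (st : Bool × List Char × Int) (i : Int) : Bool × List Char × Int :=
  match PySem.List.pyGet? s i with
  | none => st
  | some c =>
    if c = '(' then (true, st.2.1, i)
    else if st.1 = true ∧ c = '-' ∧ st.2.2 + 1 = i then
      (st.1, PySem.List.slice st.2.1 none (some i) ++ '&' :: PySem.List.slice st.2.1 (some (i + 1)) none, st.2.2)
    else st

def negNumbersReplaceMinusChar (expression : String) : String :=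
  String.ofList
    (((PySem.List.pyRange 0 (expression.toList.length : Int) 1).foldl
        (aStep expression.toList) (false, expression.toList, -1)).2.1)

-- ===== PORT B =====
def negNumbersReplaceMinusChar_alt (expression : String) : String :=
  String.ofList
    ((expression.toList.foldl
        (fun (st : List Char × Option Char) ch =>
          (st.1 ++ [if ch = '-' ∧ st.2 = some '(' then '&' else ch], some ch))
        ([], none)).1)

-- ===== PRECONDITION & SPEC =====
def Spec_negNumbersReplaceMinusChar (expression : String) (out : String) : Prop := out = negNumbersReplaceMinusChar_alt expression
instance (expression : String) (out : String) : Decidable (Spec_negNumbersReplaceMinusChar expression out) := by unfold Spec_negNumbersReplaceMinusChar; infer_instance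

-- ===== CLAIM (what is proved, stated in full; the proofs are below) =====
def Claim_equal_negNumbersReplaceMinusChar : Prop := ∀ (expression : String), Dom_negNumbersReplaceMinusChar expression → Spec_negNumbersReplaceMinusChar expression (negNumbersReplaceMinusChar expression)

-- ===== LEMMAS AND PROOFS =====
-- common spec: map each char to '&' iff it is '-' and the previous char is '('
def pvF (p : Option Char) : List Char → List Char
  | [] => []
  | c :: r => (if c = '-' ∧ p = some '(' then '&' else c) :: pvF (some c) r

-- index of the last '(' in l, or -1 (A's `index` variable)
def pvLastP (l : List Char) : Int :=
  ((l.reverse.findIdx? (· = '(')).map (fun j => (l.length : Int) - 1 - (j : Int))).getD (-1)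

lemma pvF_length (p : Option Char) (l : List Char) : (pvF p l).length = l.length := by
  induction l generalizing p with
  | nil => rfl
  | cons c r ih => simp [pvF, ih]

lemma pvF_snoc (p : Option Char) (l : List Char) (c : Char) :
    pvF p (l ++ [c]) = pvF p l ++ [if c = '-' ∧ (l.getLast?).or p = some '(' then '&' else c] := by
  induction l generalizing p with
  | nil => simp [pvF]
  | cons d r ih => simp [pvF, ih (some d), List.getLast?_cons]

lemma pvLastP_snoc (l : List Char) (c : Char) :
    pvLastP (l ++ [c]) = if c = '(' then (l.length : Int) else pvLastP l := by
  simp only [pvLastP, List.reverse_append, List.reverse_singleton, List.singleton_append,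
    List.findIdx?_cons, decide_eq_true_eq]
  by_cases h : c = '('
  · simp [h]
  · rw [if_neg h, if_neg h]
    cases hf : l.reverse.findIdx? (· = '(') with
    | none => simp
    | some j => simp; omega

lemma pvLastP_lt (l : List Char) : pvLastP l < (l.length : Int) := by
  unfold pvLastP
  cases hf : l.reverse.findIdx? (· = '(') with
  | none => simp; omega
  | some j => simp; omega

-- A's replacement condition ⟺ the previous original char is '('
lemma pvCond_iff (l : List Char) :
    (l.any (· = '(') = true ∧ pvLastP l + 1 = (l.length : Int)) ↔ l.getLast? = some '(' := by
  rcases List.eq_nil_or_concat l with rfl | ⟨r, c, rfl⟩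
  · simp [pvLastP]
  · simp only [List.concat_eq_append]
    rw [pvLastP_snoc]
    by_cases h : c = '('
    · simp [h]
    · have := pvLastP_lt r
      simp [h]
      intro h2
      omega

-- A's loop invariant
lemma pvA_loop (s : List Char) (k : Nat) (hk : k ≤ s.length) :
    (PySem.List.pyRange 0 (k : Int) 1).foldl (aStep s) (false, s, -1)
      = ((s.take k).any (· = '('), pvF none (s.take k) ++ s.drop k, pvLastP (s.take k)) := by
  induction k with
  | zero => simp [PySem.List.pyRange_one_eq_nil, pvF, pvLastP]
  | succ k ih =>
    have hklt : k < s.length := hk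
    have hkle : k ≤ s.length := le_of_lt hklt
    have hcast : ((k + 1 : Nat) : Int) = (k : Int) + 1 := by push_cast; ring
    rw [hcast, PySem.List.pyRange_one_succ_right (by positivity), List.foldl_append,
      ih hkle]
    have htake : s.take (k + 1) = s.take k ++ [s[k]] := by
      rw [List.take_add_one, List.getElem?_eq_getElem hklt]; rfl
    have hdrop : s.drop k = s[k] :: s.drop (k + 1) := List.drop_eq_getElem_cons hklt
    have hlen : (s.take k).length = k := List.length_take_of_le hkle
    have hget : PySem.List.pyGet? s (k : Int) = some s[k] := by
      simp [PySem.List.pyGet?_natCast, List.getElem?_eq_getElem hklt]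
    simp only [List.foldl_cons, List.foldl_nil, aStep, hget]
    by_cases hpar : s[k] = '('
    · -- branch 1: '(' seen: set the flag and remember the index
      rw [if_pos hpar, htake, pvF_snoc, pvLastP_snoc]
      simp [hpar, hdrop, hlen]
    · rw [if_neg hpar]
      have hcond := pvCond_iff (s.take k)
      rw [hlen] at hcond
      by_cases hrep : s[k] = '-' ∧ (s.take k).getLast? = some '('
      · -- branch 2: splice '&' into the copy
        rw [if_pos (by exact ⟨(hcond.mpr hrep.2).1, hrep.1, (hcond.mpr hrep.2).2⟩)]
        rw [htake, pvF_snoc, pvLastP_snoc]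
        have hsl1 : PySem.List.slice (pvF none (s.take k) ++ s.drop k) none (some (k : Int))
            = pvF none (s.take k) := by
          rw [PySem.List.slice_to_natCast, List.take_append_of_le_length (by simp [pvF_length, hlen]),
            List.take_of_length_le (by simp [pvF_length, hlen])]
        have hsl2 : PySem.List.slice (pvF none (s.take k) ++ s.drop k) (some ((k : Int) + 1)) none
            = s.drop (k + 1) := by
          rw [← hcast, PySem.List.slice_from_natCast, hdrop,
            show pvF none (s.take k) ++ s[k] :: s.drop (k + 1)
              = (pvF none (s.take k) ++ [s[k]]) ++ s.drop (k + 1) by simp,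
            List.drop_left' (by simp [pvF_length, hlen])]
        rw [hsl1, hsl2]
        simp [hrep.1, hrep.2]
      · -- branch 3: nothing happens at this index
        rw [if_neg (by
          rintro ⟨h1, h2, h3⟩
          exact hrep ⟨h2, hcond.mp ⟨h1, h3⟩⟩)]
        have hch : (if s[k] = '-' ∧ ((s.take k).getLast?).or none = some '(' then '&' else s[k]) = s[k] := by
          rw [if_neg]; simpa using hrep
        rw [htake, pvF_snoc, pvLastP_snoc, if_neg hpar, hch, hdrop, List.any_append]
        simp [hpar]

-- B's fold accumulates pvF
lemma pvB_loop (l : List Char) (p : Option Char) (acc : List Char) :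
    l.foldl (fun (st : List Char × Option Char) ch =>
        (st.1 ++ [if ch = '-' ∧ st.2 = some '(' then '&' else ch], some ch)) (acc, p)
      = (acc ++ pvF p l, (l.getLast?).or p) := by
  induction l generalizing p acc with
  | nil => simp [pvF]
  | cons c r ih => simp [pvF, ih (some c), List.getLast?_cons]

-- ===== VERDICT (by name: the statement is the Claim_ definition above) =====
theorem negNumbersReplaceMinusChar_spec : Claim_equal_negNumbersReplaceMinusChar := by
  intro expression _
  show _ = _
  unfold negNumbersReplaceMinusChar negNumbersReplaceMinusChar_alt
  rw [pvA_loop expression.toList expression.toList.length le_rfl, pvB_loop]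
  simp only [List.take_length, List.drop_length, List.append_nil, List.nil_append]
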